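-- pv_equiv track=rewrite | github.com/ElshadaiK/Competitive-Programming | llps.py | solution
-- ===== SOURCE A (Python) =====
-- def solution(inp):
--     res = ""
--     flag = False
--     a = [0]*30
--     for i in range(len(inp)):
--         a[ord(inp[i])-ord('a')] += 1
--     j = 27
--     while j >= 0:
--         if(a[j]>0 and not flag):
--             while(a[j] > 0):
--                 res += (chr(j + ord('a')))
--                 a[j] -= 1
--                 flag= True
--         j -= 1
--     return res
-- ===== SOURCE B (Python) =====
-- def solution(inp):
--     if not inp:
--         return ""
--     c = max(inp)
--     return c * inp.count(c)
-- ===== Notes on version B (the rewrite author's own statement) =====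
-- stated objective: simpler
-- what changed: Replaces the 30-slot frequency table and the reverse index scan with max(inp) and inp.count(c): the answer is the largest character repeated by its multiplicity, with no table maintained (two C-level passes instead of a Python-level loop).
-- outside the precondition, e.g. on solution('C'): A returns 'a', B returns 'C'; on solution('_'): A returns '', B returns '_'; on solution('`'): A returns '', B returns '`'
import Mathlib
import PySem

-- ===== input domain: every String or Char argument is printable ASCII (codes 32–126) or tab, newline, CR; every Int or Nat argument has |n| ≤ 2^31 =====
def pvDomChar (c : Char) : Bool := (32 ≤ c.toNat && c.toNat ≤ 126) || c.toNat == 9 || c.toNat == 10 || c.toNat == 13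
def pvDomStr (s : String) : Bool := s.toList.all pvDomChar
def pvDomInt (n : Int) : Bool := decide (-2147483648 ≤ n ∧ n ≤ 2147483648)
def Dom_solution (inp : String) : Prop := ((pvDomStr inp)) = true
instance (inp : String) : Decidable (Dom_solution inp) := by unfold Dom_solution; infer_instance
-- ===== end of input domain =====

-- B is simpler: the answer is the largest character repeated by its multiplicity, so B uses
-- max/count instead of A's 30-slot frequency table and reverse index scan.

-- ===== PORT A =====
-- a[ord(inp[i]) - ord('a')] += 1   (ord = Char.toNat, exact on ASCII)
def pvStep (a : List Int) (c : Char) : List Int :=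
  PySem.List.pySetD a ((c.toNat : Int) - 97) (PySem.List.pyGetD a ((c.toNat : Int) - 97) 0 + 1)

-- inner 'while a[j] > 0: res += chr(j + ord('a')); a[j] -= 1' — fuel is the counter value
def pvInner (cnt : Nat) (j : Nat) (res : List Char) : List Char :=
  match cnt with
  | 0 => res
  | n + 1 => pvInner n j (res ++ [Char.ofNat (j + 97)])   -- chr(j + ord('a')); exact on this ASCII range

-- outer 'while j >= 0' with j counting down; fuel jf = j + 1
def pvScan (a : List Int) (jf : Nat) (res : List Char) (flag : Bool) : List Char :=
  match jf with
  | 0 => res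
  | j + 1 =>
    if 0 < PySem.List.pyGetD a (j : Int) 0 ∧ flag = false then
      pvScan (PySem.List.pySetD a (j : Int) 0) j
        (pvInner (PySem.List.pyGetD a (j : Int) 0).toNat j res) true
    else
      pvScan a j res flag

def solution (inp : String) : String :=
  let cs := inp.toList
  let a : List Int :=
    (PySem.List.pyRange 0 (cs.length : Int) 1).foldl
      (fun a i => pvStep a (PySem.List.pyGetD cs i 'a'))
      (List.replicate 30 0)
  String.ofList (pvScan a 28 [] false)

-- ===== PORT B =====
def solution_alt (inp : String) : String :=
  match PySem.List.max? inp.toList (fun c => c) with   -- max(inp); none = empty string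
  | none => ""                                          -- if not inp: return ""
  | some c => String.ofList (List.replicate (PySem.List.count inp.toList c) c)  -- c * inp.count(c)

-- ===== PRECONDITION & SPEC =====
-- Pre_ excludes strings with a character outside '_'..'|' and nonempty strings of only '_'/'`':
-- there A raises IndexError (codes < 67) or its 30-slot table transposes ('C'..'^') or silently
-- drops ('_', '`', '}', '~') the character, artefacts of the table size and negative indexing.
def Pre_solution (inp : String) : Prop :=
  (inp.toList.all (fun c => '_' ≤ c && c ≤ '|')
    && (inp.toList.any (fun c => 'a' ≤ c) || inp.toList.isEmpty)) = true
instance (inp : String) : Decidable (Pre_solution inp) := by unfold Pre_solution; infer_instance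
def pvWitness_solution : String := "abacus"

def Spec_solution (inp : String) (out : String) : Prop := out = solution_alt inp
instance (inp : String) (out : String) : Decidable (Spec_solution inp out) := by unfold Spec_solution; infer_instance

-- ===== CLAIM (what is proved, stated in full; the proofs are below) =====
def Claim_equal_solution : Prop := ∀ (inp : String), Dom_solution inp → Pre_solution inp → Spec_solution inp (solution inp)

-- ===== LEMMAS AND PROOFS =====

theorem pv_char_le_iff (a b : Char) : a ≤ b ↔ a.toNat ≤ b.toNat := by
  constructor <;> intro h <;> simpa [Char.le_def, UInt32.le_iff_toNat_le] using h

theorem pv_char_toNat_inj {a b : Char} (h : a.toNat = b.toNat) : a = b := by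
  apply Char.ext
  exact UInt32.toNat_inj.mp h

theorem pv_len_step (a : List Int) (c : Char) : (pvStep a c).length = a.length := by
  simp [pvStep, PySem.List.length_pySetD]

theorem pv_rep0 (j : Nat) : PySem.List.pyGetD (List.replicate 30 (0:Int)) (j : Int) 0 = 0 := by
  rw [PySem.List.pyGetD_natCast, List.getD, List.getElem?_replicate]
  split <;> rfl

theorem pv_set_high (a : List Int) (v : Int) (k : Nat)
    (hk : 28 ≤ k) (hk30 : k < 30) (j : Nat) (hj : j < 28) :
    PySem.List.pyGetD (a.set k v) (j : Int) 0 = PySem.List.pyGetD a (j : Int) 0 := by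
  rw [PySem.List.pyGetD_natCast, PySem.List.pyGetD_natCast, List.getD, List.getD,
      List.getElem?_set_ne (by omega : k ≠ j)]

theorem pv_counts (cs : List Char) : ∀ a : List Int, a.length = 30 →
    (∀ c ∈ cs, 95 ≤ c.toNat ∧ c.toNat ≤ 124) → ∀ j : Nat, j < 28 →
    PySem.List.pyGetD (cs.foldl pvStep a) (j : Int) 0
      = PySem.List.pyGetD a (j : Int) 0 + (cs.countP (fun c => c.toNat == j + 97) : Int) := by
  induction cs with
  | nil => intro a _ _ j _; simp
  | cons c t ih =>
    intro a ha hc j hj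
    have hcr := hc c (by simp)
    rw [List.foldl_cons, ih (pvStep a c) (by rw [pv_len_step, ha])
        (fun x hx => hc x (by simp [hx])) j hj]
    rw [List.countP_cons]
    by_cases hge : 97 ≤ c.toNat
    · -- a lowercase letter (or '{', '|'): the table slot c.toNat - 97 is bumped
      have hidx : ((c.toNat : Int) - 97) = ((c.toNat - 97 : Nat) : Int) := by omega
      have hlt : c.toNat - 97 < a.length := by omega
      have hget : PySem.List.pyGetD (pvStep a c) (j : Int) 0
          = if j = c.toNat - 97
            then PySem.List.pyGetD a ((c.toNat - 97 : Nat) : Int) 0 + 1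
            else PySem.List.pyGetD a (j : Int) 0 := by
        rw [pvStep, hidx]
        exact PySem.List.pyGetD_pySetD_natCast a (c.toNat - 97) j _ 0 hlt
      rw [hget]
      by_cases hcase : c.toNat = j + 97
      · rw [if_pos (by omega)]
        have hji : ((c.toNat - 97 : Nat) : Int) = (j : Int) := by omega
        rw [hji]
        simp [hcase]
        ring
      · rw [if_neg (by omega)]
        simp [hcase]
    · -- '_' or '`': Python's a[-2] / a[-1] wrap to slots 28 / 29, which j < 28 never reads
      have h95 : c.toNat = 95 ∨ c.toNat = 96 := by omega
      have hset : pvStep a c = a.set (c.toNat - 67) (PySem.List.pyGetD a ((c.toNat : Int) - 97) 0 + 1) := by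
        rcases h95 with h | h <;>
          · rw [pvStep, h]
            simp [PySem.List.pySetD, PySem.List.pySet?, PySem.List.pyIdx?, ha]
      rw [hset, pv_set_high a _ (c.toNat - 67) (by omega) (by omega) j hj]
      have : (c.toNat == j + 97) = false := by simp; omega
      rw [this]
      simp

theorem pvInner_eq (cnt j : Nat) : ∀ res, pvInner cnt j res = res ++ List.replicate cnt (Char.ofNat (j + 97)) := by
  induction cnt with
  | zero => intro res; simp [pvInner]
  | succ n ih =>
    intro res
    rw [pvInner, ih]
    simp [List.replicate_succ]

theorem pvScan_flag_true (n : Nat) : ∀ (a : List Int) (res : List Char), pvScan a n res true = res := by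
  induction n with
  | zero => intro a res; rfl
  | succ j ih => intro a res; simp [pvScan, ih]

theorem pvScan_none (n : Nat) : ∀ (a : List Int),
    (∀ j, j < n → PySem.List.pyGetD a (j : Int) 0 ≤ 0) → pvScan a n [] false = [] := by
  induction n with
  | zero => intro a _; rfl
  | succ j ih =>
    intro a h
    rw [pvScan, if_neg (by have := h j (by omega); rintro ⟨hpos, _⟩; omega)]
    exact ih a (fun i hi => h i (by omega))

theorem pvScan_hit (a : List Int) (j0 : Nat) : ∀ n, j0 < n →
    0 < PySem.List.pyGetD a (j0 : Int) 0 →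
    (∀ j, j0 < j → j < n → PySem.List.pyGetD a (j : Int) 0 ≤ 0) →
    pvScan a n [] false
      = List.replicate (PySem.List.pyGetD a (j0 : Int) 0).toNat (Char.ofNat (j0 + 97)) := by
  intro n
  induction n with
  | zero => intro h; exact absurd h (Nat.not_lt_zero _)
  | succ j ih =>
    intro hlt hpos habove
    by_cases hj : j0 = j
    · subst hj
      rw [pvScan, if_pos ⟨hpos, rfl⟩, pvScan_flag_true, pvInner_eq]
      simp
    · have hjlt : j0 < j := by omega
      rw [pvScan, if_neg (by have := habove j hjlt (by omega); rintro ⟨h, _⟩; omega)]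
      exact ih hjlt hpos (fun i h1 h2 => habove i h1 (by omega))

theorem solution_spec : Claim_equal_solution := by
  intro inp _ hpre
  unfold Spec_solution solution solution_alt
  simp only []
  have hfold : (PySem.List.pyRange 0 (inp.toList.length : Int) 1).foldl
      (fun a i => pvStep a (PySem.List.pyGetD inp.toList i 'a')) (List.replicate 30 0)
      = inp.toList.foldl pvStep (List.replicate 30 0) :=
    PySem.List.foldl_pyRange_zero_pyGetD' inp.toList 'a' pvStep (List.replicate 30 0)
  rw [hfold]
  unfold Pre_solution at hpre
  simp only [Bool.and_eq_true, Bool.or_eq_true] at hpre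
  have hrange : ∀ c ∈ inp.toList, 95 ≤ c.toNat ∧ c.toNat ≤ 124 := by
    intro c hc
    have h := List.all_eq_true.mp hpre.1 c hc
    simp only [Bool.and_eq_true, decide_eq_true_eq] at h
    have h1 := (pv_char_le_iff '_' c).mp h.1
    have h2 := (pv_char_le_iff c '|').mp h.2
    exact ⟨h1, h2⟩
  have hcounts := pv_counts inp.toList (List.replicate 30 0) (by simp) hrange
  cases hmax : PySem.List.max? inp.toList (fun c => c) with
  | none =>
    have hnil : inp.toList = [] := (PySem.List.max?_eq_none_iff _ _).mp hmax
    rw [hnil] at hcounts ⊢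
    rw [pvScan_none 28 _ (fun j hj => by
      rw [hcounts j (by omega), pv_rep0]; simp)]
  | some m =>
    have hmem : m ∈ inp.toList := PySem.List.max?_mem hmax
    have hisMax : ∀ y ∈ inp.toList, y ≤ m := PySem.List.max?_isMax hmax
    have hm124 := (hrange m hmem).2
    have hm97 : 97 ≤ m.toNat := by
      rcases hpre.2 with hany | hemp
      · obtain ⟨c, hc, hc97⟩ := List.any_eq_true.mp hany
        simp only [decide_eq_true_eq] at hc97
        have := (pv_char_le_iff c m).mp (hisMax c hc)
        have := (pv_char_le_iff 'a' c).mp hc97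
        have ha97 : ('a').toNat = 97 := rfl
        omega
      · rw [List.isEmpty_iff] at hemp
        rw [hemp] at hmem
        exact absurd hmem (List.not_mem_nil)
    set j0 : Nat := m.toNat - 97 with hj0def
    have hj097 : j0 + 97 = m.toNat := by omega
    have hj027 : j0 < 28 := by omega
    have hcntP : inp.toList.countP (fun c => c.toNat == j0 + 97) = inp.toList.count m := by
      rw [List.count]
      apply List.countP_congr
      intro x _
      constructor
      · intro hx
        have : x.toNat = m.toNat := by
          have := of_decide_eq_true (by simpa using hx)
          omega
        simpa using pv_char_toNat_inj this
      · intro hx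
        have : x = m := by simpa using hx
        subst this
        simp [hj097]
    have hpos : 0 < PySem.List.pyGetD (inp.toList.foldl pvStep (List.replicate 30 0)) (j0 : Int) 0 := by
      rw [hcounts j0 (by omega), hcntP, pv_rep0]
      have : 0 < inp.toList.count m := List.count_pos_iff.mpr hmem
      simp only [zero_add]
      exact_mod_cast this
    have habove : ∀ j, j0 < j → j < 28 →
        PySem.List.pyGetD (inp.toList.foldl pvStep (List.replicate 30 0)) (j : Int) 0 ≤ 0 := by
      intro j h1 h2
      rw [hcounts j (by omega)]
      have hzero : inp.toList.countP (fun c => c.toNat == j + 97) = 0 := by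
        apply List.countP_eq_zero.mpr
        intro c hc hcj
        have hcj' : c.toNat = j + 97 := by
          have := of_decide_eq_true (by simpa using hcj)
          omega
        have := (pv_char_le_iff c m).mp (hisMax c hc)
        omega
      rw [hzero, pv_rep0]
      simp
    rw [pvScan_hit _ j0 28 (by omega) hpos habove]
    rw [hcounts j0 (by omega), hcntP, pv_rep0]
    have hchar : Char.ofNat (j0 + 97) = m := by
      rw [hj097]
      exact Char.ofNat_toNat m
    rw [hchar]
    simp [PySem.List.count_eq]
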